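-- pv_equiv track=rewrite | github.com/mcole22266/letter_guesser | lib/guess_letter.py | filter_charnotfound
-- ===== SOURCE A (Python) =====
-- def filter_charnotfound(chars_notfound, wordlist):
--     filtered_wordlist = []
--     for word in wordlist:
--         word_passedfiltration = True
--         for wordchar in word:
--             if wordchar in chars_notfound:
--                 word_passedfiltration = False
--         if word_passedfiltration:
--             filtered_wordlist.append(word)
--     return filtered_wordlist
-- ===== SOURCE B (Python) =====
-- def filter_charnotfound(chars_notfound, wordlist):
--     remaining = wordlist
--     for forbidden in chars_notfound:
--         remaining = [word for word in remaining if forbidden not in set(word)]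
--     return remaining
-- ===== Notes on version B (the rewrite author's own statement) =====
-- stated objective: alternative
-- what changed: Inverts the traversal: instead of scanning each word's characters against the forbidden list, B folds over the forbidden characters, repeatedly narrowing the word list by filtering out words whose character set contains the current forbidden entry; correctness rests on the two quantifiers commuting.
import Mathlib
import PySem

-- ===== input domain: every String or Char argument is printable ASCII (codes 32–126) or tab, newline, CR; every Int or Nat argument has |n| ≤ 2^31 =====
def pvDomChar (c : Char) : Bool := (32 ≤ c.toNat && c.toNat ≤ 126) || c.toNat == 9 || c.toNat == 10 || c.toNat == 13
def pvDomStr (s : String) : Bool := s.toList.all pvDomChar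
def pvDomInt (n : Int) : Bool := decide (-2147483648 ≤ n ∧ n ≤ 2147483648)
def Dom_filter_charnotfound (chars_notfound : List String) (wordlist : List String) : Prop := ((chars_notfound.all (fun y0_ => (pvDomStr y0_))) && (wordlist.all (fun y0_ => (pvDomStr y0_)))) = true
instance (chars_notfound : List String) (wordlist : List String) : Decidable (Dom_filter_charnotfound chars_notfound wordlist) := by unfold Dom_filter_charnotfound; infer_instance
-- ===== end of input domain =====

-- B inverts the traversal: it folds over the forbidden entries, repeatedly narrowing the
-- word list (alternative decomposition; same return value, no side effects in either version).

-- ===== PORT A =====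
-- literal transliteration: outer loop over words appends word if the inner flag loop left the flag true
def filter_charnotfound (chars_notfound : List String) (wordlist : List String) : List String :=
  wordlist.foldl (fun filtered_wordlist word =>
    let word_passedfiltration :=
      word.toList.foldl (fun f wordchar =>
        if chars_notfound.contains (String.ofList [wordchar]) then false else f) true
    if word_passedfiltration then filtered_wordlist ++ [word] else filtered_wordlist) []

-- ===== PORT B =====
-- for forbidden in chars_notfound: remaining = [word for word in remaining if forbidden not in set(word)]
def filter_charnotfound_alt (chars_notfound : List String) (wordlist : List String) : List String :=
  chars_notfound.foldl (fun remaining forbidden =>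
    remaining.filter (fun word =>
      !(PySem.Set.contains (PySem.Set.ofList (word.toList.map (fun c => String.ofList [c]))) forbidden)))
    wordlist

-- ===== PRECONDITION & SPEC =====
def Spec_filter_charnotfound (chars_notfound : List String) (wordlist : List String) (out : List String) : Prop := out = filter_charnotfound_alt chars_notfound wordlist
instance (chars_notfound : List String) (wordlist : List String) (out : List String) : Decidable (Spec_filter_charnotfound chars_notfound wordlist out) := by unfold Spec_filter_charnotfound; infer_instance

-- ===== CLAIM (what is proved, stated in full; the proofs are below) =====
def Claim_equal_filter_charnotfound : Prop := ∀ (chars_notfound : List String) (wordlist : List String), Dom_filter_charnotfound chars_notfound wordlist → Spec_filter_charnotfound chars_notfound wordlist (filter_charnotfound chars_notfound wordlist)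

-- ===== LEMMAS AND PROOFS =====

-- A's inner flag loop computes: no character of the word is (as a string) in chars_notfound
theorem flag_eq_all (cn : List String) (l : List Char) (b : Bool) :
    l.foldl (fun f c => if cn.contains (String.ofList [c]) then false else f) b
      = (b && l.all (fun c => !(cn.contains (String.ofList [c])))) := by
  induction l generalizing b with
  | nil => simp
  | cons c l ih =>
    simp only [List.foldl_cons, List.all_cons, ih]
    by_cases h : cn.contains (String.ofList [c]) = true <;>
      simp [Bool.and_left_comm, Bool.and_assoc]

-- B's staged filtering collapses into one filter by the conjunction over chars_notfound
theorem foldl_filter_eq_filter_all {α β : Type} (p : β → α → Bool) (cn : List β) (wl : List α) :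
    cn.foldl (fun r ch => r.filter (p ch)) wl
      = wl.filter (fun w => cn.all (fun ch => p ch w)) := by
  induction cn generalizing wl with
  | nil => simp
  | cons ch cn ih =>
    simp only [List.foldl_cons, ih, List.filter_filter, List.all_cons]
    apply List.filter_congr
    intro w _
    exact Bool.and_comm _ _

-- the two quantifiers commute: "every forbidden entry misses the word" = "every character is not forbidden"
theorem quantifier_swap (cn : List String) (w : String) :
    cn.all (fun ch =>
        !(PySem.Set.contains (PySem.Set.ofList (w.toList.map (fun c => String.ofList [c]))) ch))
      = w.toList.all (fun c => !(cn.contains (String.ofList [c]))) := by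
  rw [Bool.eq_iff_iff]
  simp only [List.all_eq_true, Bool.not_eq_eq_eq_not, Bool.not_true, Bool.eq_false_iff, Ne,
    PySem.Set.contains, List.contains_eq_mem, decide_eq_true_eq, PySem.Set.mem_ofList,
    List.mem_map]
  constructor
  · intro h c hc hmem
    exact h _ hmem ⟨c, hc, rfl⟩
  · rintro h ch hch ⟨c, hc, rfl⟩
    exact h c hc hch

-- ===== VERDICT (by name: the statement is the Claim_ definition above) =====
theorem filter_charnotfound_spec : Claim_equal_filter_charnotfound := by
  intro cn wl _
  show filter_charnotfound cn wl = filter_charnotfound_alt cn wl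
  unfold filter_charnotfound filter_charnotfound_alt
  simp only [flag_eq_all, Bool.true_and]
  rw [PySem.List.foldl_append_if_eq_filter, foldl_filter_eq_filter_all]
  apply List.filter_congr
  intro w _
  exact (quantifier_swap cn w).symm
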